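-- pv_equiv track=rewrite | github.com/ptq204/pacman_AI | NewFile/level3.py | SortedSuccessor
-- ===== SOURCE A (Python) =====
-- def successors( i, j):
--     dx = [-1,0,1,0]
--     dy = [0,-1,0,1]
--     res = []
--     for k in range(0,4):
--         res.append(tuple([i+dx[k],j+dy[k]]))
--     return res
--
-- def valid(node,map,m,n):
--     x = node[0]
--     y = node[1]
--     if x < 0 or y < 0:
--         return False
--     if x >= n or y >= m:
--         return False
--     if map[node[0]][node[1]] == 2:
--         return True
--     if map[node[0]][node[1]] == 0:
--         return True
--     return False
--
-- def SortedSuccessor(map,node,m,n):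
--     r = successors(node[0],node[1])
--     res = []
--     for cur in r:
--         if valid(cur,map,m,n):
--             k = 0
--             while k < len(res) and map[res[k][0]][res[k][1]] > map[cur[0]][cur[1]]:
--                 k+=1
--             res.insert(k,cur)
--     return res
-- ===== SOURCE B (Python) =====
-- def successors( i, j):
--     dx = [-1,0,1,0]
--     dy = [0,-1,0,1]
--     res = []
--     for k in range(0,4):
--         res.append(tuple([i+dx[k],j+dy[k]]))
--     return res
--
-- def valid(node,map,m,n):
--     x = node[0]
--     y = node[1]
--     if x < 0 or y < 0:
--         return False
--     if x >= n or y >= m: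
--         return False
--     if map[node[0]][node[1]] == 2:
--         return True
--     if map[node[0]][node[1]] == 0:
--         return True
--     return False
--
-- def SortedSuccessor(map,node,m,n):
--     # valid cells hold only 2 or 0, so a two-bucket partition replaces the
--     # insertion sort: scan the neighbours back-to-front (A's descending
--     # insert places the newest tie first), 2-cells before 0-cells.
--     res2, res0 = [], []
--     for cur in reversed(successors(node[0], node[1])):
--         if valid(cur, map, m, n):
--             (res2 if map[cur[0]][cur[1]] == 2 else res0).append(cur)
--     return res2 + res0
-- ===== Notes on version B (the rewrite author's own statement) =====
-- stated objective: simpler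
-- what changed: Replaces the incremental descending insertion sort with a single two-bucket partition pass: since valid cells hold only value 2 or 0, scanning the neighbours back-to-front and concatenating the 2-bucket before the 0-bucket reproduces A's order (including ties) with no sorting at all.
-- outside the precondition, e.g. on SortedSuccessor([[0]], (1, 0), 2, 2): A raises IndexError, B raises IndexError
import Mathlib
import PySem

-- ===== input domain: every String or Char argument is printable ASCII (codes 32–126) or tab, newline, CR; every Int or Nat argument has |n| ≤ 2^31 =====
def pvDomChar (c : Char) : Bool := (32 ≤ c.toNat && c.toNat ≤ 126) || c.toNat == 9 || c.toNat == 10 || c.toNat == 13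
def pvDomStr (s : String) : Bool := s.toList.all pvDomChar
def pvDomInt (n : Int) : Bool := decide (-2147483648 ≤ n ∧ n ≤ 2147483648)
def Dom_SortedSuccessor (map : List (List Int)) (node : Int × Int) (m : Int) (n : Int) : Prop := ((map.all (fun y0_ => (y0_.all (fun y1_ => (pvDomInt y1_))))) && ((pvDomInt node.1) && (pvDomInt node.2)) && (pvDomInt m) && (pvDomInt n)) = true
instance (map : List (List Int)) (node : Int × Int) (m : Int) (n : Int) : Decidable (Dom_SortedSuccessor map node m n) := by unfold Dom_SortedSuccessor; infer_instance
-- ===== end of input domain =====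

-- B replaces A's incremental descending insertion sort by a two-bucket partition
-- (valid cells hold only value 2 or 0), scanning the neighbours back-to-front; objective: simpler.

-- ===== PORT A =====
-- successors(i,j): the loop over range(0,4) appending (i+dx[k], j+dy[k])
def pvSuccessors (i j : Int) : List (Int × Int) :=
  let dx : List Int := [-1, 0, 1, 0]
  let dy : List Int := [0, -1, 0, 1]
  (PySem.List.pyRange 0 4 1).foldl
    (fun res k => res ++ [(i + (PySem.List.pyGet? dx k).getD 0, j + (PySem.List.pyGet? dy k).getD 0)]) []

-- map[x][y]; in range whenever Pre_ holds (getD defaults are never reached there)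
def pvMapVal (map : List (List Int)) (c : Int × Int) : Int :=
  (PySem.List.pyGet? ((PySem.List.pyGet? map c.1).getD []) c.2).getD 0

def pvValid (node : Int × Int) (map : List (List Int)) (m n : Int) : Bool :=
  let x := node.1
  let y := node.2
  if x < 0 || y < 0 then false
  else if x ≥ n || y ≥ m then false
  else if pvMapVal map node == 2 then true
  else if pvMapVal map node == 0 then true
  else false

-- the while-loop + res.insert(k,cur): scan past strictly larger values, insert there
def pvInsertA (map : List (List Int)) (cur : Int × Int) : List (Int × Int) → List (Int × Int)
  | [] => [cur]
  | h :: t => if pvMapVal map h > pvMapVal map cur then h :: pvInsertA map cur t else cur :: h :: t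

def SortedSuccessor (map : List (List Int)) (node : Int × Int) (m : Int) (n : Int) : List (Int × Int) :=
  (pvSuccessors node.1 node.2).foldl
    (fun res cur => if pvValid cur map m n then pvInsertA map cur res else res) []

-- ===== PORT B =====
def SortedSuccessor_alt (map : List (List Int)) (node : Int × Int) (m : Int) (n : Int) : List (Int × Int) :=
  let acc := ((pvSuccessors node.1 node.2).reverse).foldl
    (fun (acc : List (Int × Int) × List (Int × Int)) cur =>
      if pvValid cur map m n then
        if pvMapVal map cur == 2 then (acc.1 ++ [cur], acc.2) else (acc.1, acc.2 ++ [cur])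
      else acc) ([], [])
  acc.1 ++ acc.2

-- ===== PRECONDITION & SPEC =====
-- Pre_ excludes exactly the inputs on which A raises IndexError: a neighbour that passes the
-- 0 ≤ x < n, 0 ≤ y < m bound checks but lies outside the actual extent of `map`.
def Pre_SortedSuccessor (map : List (List Int)) (node : Int × Int) (m : Int) (n : Int) : Prop :=
  ∀ c ∈ [(node.1 - 1, node.2), (node.1, node.2 - 1), (node.1 + 1, node.2), (node.1, node.2 + 1)],
    (0 ≤ c.1 ∧ 0 ≤ c.2 ∧ c.1 < n ∧ c.2 < m) →
      c.1 < (map.length : Int) ∧ c.2 < ((map.getD c.1.toNat []).length : Int)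
instance (map : List (List Int)) (node : Int × Int) (m : Int) (n : Int) : Decidable (Pre_SortedSuccessor map node m n) := by unfold Pre_SortedSuccessor; infer_instance
def pvWitness_SortedSuccessor : List (List Int) × (Int × Int) × Int × Int :=
  ([[0, 2, 1], [2, 0, 0], [1, 0, 2]], (1, 1), 3, 3)

def Spec_SortedSuccessor (map : List (List Int)) (node : Int × Int) (m : Int) (n : Int) (out : List (Int × Int)) : Prop := out = SortedSuccessor_alt map node m n
instance (map : List (List Int)) (node : Int × Int) (m : Int) (n : Int) (out : List (Int × Int)) : Decidable (Spec_SortedSuccessor map node m n out) := by unfold Spec_SortedSuccessor; infer_instance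

-- ===== CLAIM (what is proved, stated in full; the proofs are below) =====
def Claim_equal_SortedSuccessor : Prop := ∀ (map : List (List Int)) (node : Int × Int) (m : Int) (n : Int), Dom_SortedSuccessor map node m n → Pre_SortedSuccessor map node m n → Spec_SortedSuccessor map node m n (SortedSuccessor map node m n)

-- ===== LEMMAS AND PROOFS =====

-- any cell accepted by pvValid holds value 2 or 0
theorem pvValid_val {c : Int × Int} {map : List (List Int)} {m n : Int}
    (h : pvValid c map m n = true) : pvMapVal map c = 2 ∨ pvMapVal map c = 0 := by
  unfold pvValid at h
  by_cases h2 : pvMapVal map c == 2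
  · exact Or.inl (by exact_mod_cast beq_iff_eq.mp h2)
  by_cases h0 : pvMapVal map c == 0
  · exact Or.inr (by exact_mod_cast beq_iff_eq.mp h0)
  · simp [h2, h0] at h

-- inserting a 2-cell: everything present is ≤ 2, so it lands at the front
theorem pvInsertA_two {map : List (List Int)} {cur : Int × Int} {L : List (Int × Int)}
    (hL : ∀ c ∈ L, pvMapVal map c = 2 ∨ pvMapVal map c = 0)
    (hc : pvMapVal map cur = 2) : pvInsertA map cur L = cur :: L := by
  cases L with
  | nil => rfl
  | cons h t =>
    unfold pvInsertA
    rcases hL h (by simp) with hv | hv <;> rw [hv, hc] <;> simp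

-- inserting a 0-cell into twos ++ zeros: it lands between the blocks
theorem pvInsertA_zero {map : List (List Int)} {cur : Int × Int} (r2 r0 : List (Int × Int))
    (h2 : ∀ c ∈ r2, pvMapVal map c = 2) (h0 : ∀ c ∈ r0, pvMapVal map c = 0)
    (hc : pvMapVal map cur = 0) : pvInsertA map cur (r2 ++ r0) = r2 ++ cur :: r0 := by
  induction r2 with
  | nil =>
    cases r0 with
    | nil => simp [pvInsertA]
    | cons hd t =>
      have hhd : pvMapVal map hd = 0 := h0 hd (List.mem_cons_self ..)
      simp only [List.nil_append]
      unfold pvInsertA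
      rw [hhd, hc]
      simp
  | cons hd t ih =>
    have hhd : pvMapVal map hd = 2 := h2 hd (List.mem_cons_self ..)
    simp only [List.cons_append]
    unfold pvInsertA
    rw [hhd, hc, if_pos (by norm_num : (2:Int) > 0),
      ih (fun c hcm => h2 c (List.mem_cons_of_mem _ hcm))]

-- A's fold, generalized: result is reversed 2-filter ++ reversed 0-filter
theorem foldA_partition (map : List (List Int)) (m n : Int) (l : List (Int × Int)) :
    ∀ (r2 r0 : List (Int × Int)),
      (∀ c ∈ r2, pvMapVal map c = 2) → (∀ c ∈ r0, pvMapVal map c = 0) →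
      l.foldl (fun res cur => if pvValid cur map m n then pvInsertA map cur res else res) (r2 ++ r0)
        = ((l.filter (fun c => pvValid c map m n && (pvMapVal map c == 2))).reverse ++ r2)
          ++ ((l.filter (fun c => pvValid c map m n && !(pvMapVal map c == 2))).reverse ++ r0) := by
  induction l with
  | nil => intro r2 r0 _ _; simp
  | cons c t ih =>
    intro r2 r0 h2 h0
    simp only [List.foldl_cons, List.filter_cons]
    by_cases hv : pvValid c map m n = true
    · rcases pvValid_val hv with hval | hval
      · have hall : ∀ x ∈ r2 ++ r0, pvMapVal map x = 2 ∨ pvMapVal map x = 0 := by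
          intro x hx
          rcases List.mem_append.mp hx with hx | hx
          · exact Or.inl (h2 x hx)
          · exact Or.inr (h0 x hx)
        have h2' : ∀ x ∈ c :: r2, pvMapVal map x = 2 := by
          intro x hx
          rcases List.mem_cons.mp hx with rfl | hx
          · exact hval
          · exact h2 x hx
        rw [if_pos hv, pvInsertA_two hall hval,
          show c :: (r2 ++ r0) = (c :: r2) ++ r0 from rfl, ih (c :: r2) r0 h2' h0]
        simp [hv, hval]
      · have h0' : ∀ x ∈ c :: r0, pvMapVal map x = 0 := by
          intro x hx
          rcases List.mem_cons.mp hx with rfl | hx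
          · exact hval
          · exact h0 x hx
        rw [if_pos hv, pvInsertA_zero r2 r0 h2 h0 hval, ih r2 (c :: r0) h2 h0']
        simp [hv, hval]
    · rw [if_neg hv, ih r2 r0 h2 h0]
      simp [hv]

-- B's fold, generalized: plain filters into the two buckets
theorem foldB_filter (map : List (List Int)) (m n : Int) (l : List (Int × Int)) :
    ∀ (a2 a0 : List (Int × Int)),
      l.foldl (fun (acc : List (Int × Int) × List (Int × Int)) cur =>
          if pvValid cur map m n then
            if pvMapVal map cur == 2 then (acc.1 ++ [cur], acc.2) else (acc.1, acc.2 ++ [cur])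
          else acc) (a2, a0)
        = (a2 ++ l.filter (fun c => pvValid c map m n && (pvMapVal map c == 2)),
           a0 ++ l.filter (fun c => pvValid c map m n && !(pvMapVal map c == 2))) := by
  induction l with
  | nil => intro a2 a0; simp
  | cons c t ih =>
    intro a2 a0
    simp only [List.foldl_cons, List.filter_cons]
    by_cases hv : pvValid c map m n = true
    · by_cases h2 : pvMapVal map c == 2
      · rw [if_pos hv, if_pos h2, ih]; simp [hv, h2]
      · rw [if_pos hv, if_neg h2, ih]; simp [hv, h2]
    · rw [if_neg hv, ih]; simp [hv]

-- ===== VERDICT (by name: the statement is the Claim_ definition above) =====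
theorem SortedSuccessor_spec : Claim_equal_SortedSuccessor := by
  intro map node m n _ _
  show SortedSuccessor map node m n = SortedSuccessor_alt map node m n
  unfold SortedSuccessor SortedSuccessor_alt
  have hA := foldA_partition map m n (pvSuccessors node.1 node.2) [] []
    (by simp) (by simp)
  have hB := foldB_filter map m n (pvSuccessors node.1 node.2).reverse [] []
  simp only [List.append_nil, List.nil_append] at hA hB
  simp only [hA, hB, List.filter_reverse]
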